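-- pv_equiv track=rewrite | github.com/TuanKiet1774/CoVietNam | CoDang.py | tokenize_path
-- ===== SOURCE A (Python) =====
-- def tokenize_path(d):
--     d = d.replace(',', ' ')
--     tokens = []
--     i = 0
--     while i < len(d):
--         ch = d[i]
--         if ch in 'MmLlCcZz':
--             tokens.append(ch)
--             i += 1
--         elif ch in ' \t\r\n':
--             i += 1
--         else:
--             j = i
--             while j < len(d) and d[j] not in 'MmLlCcZz \t\r\n':
--                 j += 1
--             tokens.append(d[i:j])
--             i = j
--     return tokens
-- ===== SOURCE B (Python) =====
-- def tokenize_path(d):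
--     d = d.replace(',', ' ')
--     tokens = []
--     buf = []
--     for ch in d:
--         if ch in 'MmLlCcZz':
--             if buf:
--                 tokens.append(''.join(buf))
--                 buf = []
--             tokens.append(ch)
--         elif ch in ' \t\r\n':
--             if buf:
--                 tokens.append(''.join(buf))
--                 buf = []
--         else:
--             buf.append(ch)
--     if buf:
--         tokens.append(''.join(buf))
--     return tokens
-- ===== Notes on version B (the rewrite author's own statement) =====
-- stated objective: alternative
-- what changed: Replaces the index-based while loop with inner lookahead slicing by a single forward pass over the characters that maintains an accumulator buffer, flushed on command/whitespace characters and at the end; avoiding per-token index arithmetic and slicing gives a constant-factor speedup.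
import Mathlib
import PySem

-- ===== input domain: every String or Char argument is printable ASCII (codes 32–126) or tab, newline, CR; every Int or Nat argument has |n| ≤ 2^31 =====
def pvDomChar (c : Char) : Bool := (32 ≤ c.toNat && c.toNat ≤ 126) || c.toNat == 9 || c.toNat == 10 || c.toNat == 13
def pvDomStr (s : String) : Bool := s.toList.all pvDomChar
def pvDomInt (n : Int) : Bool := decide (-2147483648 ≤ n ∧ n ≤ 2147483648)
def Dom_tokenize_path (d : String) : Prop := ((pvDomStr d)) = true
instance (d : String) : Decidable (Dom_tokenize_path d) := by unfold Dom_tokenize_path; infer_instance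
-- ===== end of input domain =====

-- B replaces A's index-based loop with inner lookahead slice by a single pass with a flush-on-delimiter accumulator buffer (objective: alternative decomposition).

-- ===== PORT A =====
-- 'ch in "MmLlCcZz"' (command characters)
def pvIsCmd (c : Char) : Bool := c ∈ ['M','m','L','l','C','c','Z','z']
-- 'ch in " \t\r\n"' (whitespace characters)
def pvIsWs (c : Char) : Bool := c ∈ [' ','\t','\r','\n']
-- the inner while-loop condition: d[j] not in 'MmLlCcZz \t\r\n'
def pvIsTokChar (c : Char) : Bool := !(pvIsCmd c) && !(pvIsWs c)

-- A's outer while loop over the remaining suffix; the inner while collecting d[i:j] is takeWhile/dropWhile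
def tokA : List Char → List String
  | [] => []
  | c :: rest =>
    if pvIsCmd c then String.ofList [c] :: tokA rest
    else if pvIsWs c then tokA rest
    else String.ofList (c :: rest.takeWhile pvIsTokChar) :: tokA (rest.dropWhile pvIsTokChar)
termination_by l => l.length
decreasing_by
  · simp
  · simp
  · exact Nat.lt_succ_of_le (List.length_dropWhile_le _ _)

def tokenize_path (d : String) : List String :=
  tokA (PySem.Str.replace d "," " ").toList

-- ===== PORT B =====
-- 'if buf: tokens.append("".join(buf)); buf = []'
def pvFlush (toks : List String) (buf : List Char) : List String :=
  if buf = [] then toks else toks ++ [String.ofList buf]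

-- the body of B's for-loop, state = (tokens, buf)
def pvStepB (s : List String × List Char) (c : Char) : List String × List Char :=
  if pvIsCmd c then (pvFlush s.1 s.2 ++ [String.ofList [c]], [])
  else if pvIsWs c then (pvFlush s.1 s.2, [])
  else (s.1, s.2 ++ [c])

def tokenize_path_alt (d : String) : List String :=
  let s := (PySem.Str.replace d "," " ").toList.foldl pvStepB ([], [])
  pvFlush s.1 s.2

-- ===== PRECONDITION & SPEC =====
def Spec_tokenize_path (d : String) (out : List String) : Prop := out = tokenize_path_alt d
instance (d : String) (out : List String) : Decidable (Spec_tokenize_path d out) := by unfold Spec_tokenize_path; infer_instance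

-- ===== CLAIM (what is proved, stated in full; the proofs are below) =====
def Claim_equal_tokenize_path : Prop := ∀ (d : String), Dom_tokenize_path d → Spec_tokenize_path d (tokenize_path d)

-- ===== LEMMAS AND PROOFS =====

-- loop invariant: running B's fold from state (toks, buf) and flushing at the end yields
-- toks, then (if nonempty) the token started in buf completed by l's leading token chars, then A's tokens of the rest
theorem pvInv (l : List Char) : ∀ (toks : List String) (buf : List Char),
    pvFlush (l.foldl pvStepB (toks, buf)).1 (l.foldl pvStepB (toks, buf)).2 =
      toks ++ (if buf = [] then tokA l
               else String.ofList (buf ++ l.takeWhile pvIsTokChar) :: tokA (l.dropWhile pvIsTokChar)) := by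
  induction l with
  | nil =>
    intro toks buf
    by_cases h : buf = [] <;> simp [pvFlush, tokA, h]
  | cons c rest ih =>
    intro toks buf
    simp only [List.foldl_cons]
    by_cases hc : pvIsCmd c
    · simp only [pvStepB, hc, if_true]
      rw [ih]
      have hnt : pvIsTokChar c = false := by simp [pvIsTokChar, hc]
      by_cases h : buf = [] <;>
        simp [h, pvFlush, tokA, hc, List.takeWhile_cons, List.dropWhile_cons, hnt]
    · by_cases hw : pvIsWs c
      · simp only [pvStepB, hc, hw, if_true, if_false, Bool.false_eq_true]
        rw [ih]
        have hnt : pvIsTokChar c = false := by simp [pvIsTokChar, hw]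
        by_cases h : buf = [] <;>
          simp [h, pvFlush, tokA, hc, hw, List.takeWhile_cons, List.dropWhile_cons, hnt]
      · have ht : pvIsTokChar c = true := by simp [pvIsTokChar, hc, hw]
        simp only [pvStepB, hc, hw, if_false, Bool.false_eq_true]
        rw [ih]
        by_cases h : buf = [] <;>
          simp [h, pvFlush, tokA, hc, hw, List.takeWhile_cons, List.dropWhile_cons, ht]

-- ===== VERDICT (by name: the statement is the Claim_ definition above) =====
theorem tokenize_path_spec : Claim_equal_tokenize_path := by
  intro d _
  show tokenize_path d = tokenize_path_alt d
  simp [tokenize_path, tokenize_path_alt, pvInv]
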